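-- pv_equiv track=rewrite | github.com/whatevery1says/we1s-templates | src/templates/v0.1.9/modules/export/scripts/json_to_txt_csv.py | debag
-- ===== SOURCE A (Python) =====
-- def debag(bag_of_words, join_token=' '):
--     """
--     Parameters:
--         bag_of_words(dict): {word:count, word:count}
--         join_token(str): token for joining words
--
--     Returns:
--         str: a sorted, joined list of tokens, repeated by key counts
--
--     Example:
--         {'the':3, 'quick':1, 'brown':2}
--         'brown brown the the the quick'
--     """
--     words = []
--     for key, val in bag_of_words.items():
--         for i in range(val):
--             words.append(key)
--     words.sort()
--     result = join_token.join(words)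
--     return result
-- ===== SOURCE B (Python) =====
-- def debag(bag_of_words, join_token=' '):
--     # Build one pre-joined group string per distinct word (keys sorted),
--     # then join the group strings; no flat repeated-word list, no big sort.
--     groups = [join_token.join([word] * count)
--               for word, count in sorted(bag_of_words.items(), key=lambda kv: kv[0])
--               if count > 0]
--     return join_token.join(groups)
-- ===== Notes on version B (the rewrite author's own statement) =====
-- stated objective: alternative
-- what changed: B sorts only the distinct keys and builds one pre-joined group string per key (joining the groups at the end), instead of expanding every key into one flat repeated-word list and sorting that whole list.
import Mathlib
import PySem

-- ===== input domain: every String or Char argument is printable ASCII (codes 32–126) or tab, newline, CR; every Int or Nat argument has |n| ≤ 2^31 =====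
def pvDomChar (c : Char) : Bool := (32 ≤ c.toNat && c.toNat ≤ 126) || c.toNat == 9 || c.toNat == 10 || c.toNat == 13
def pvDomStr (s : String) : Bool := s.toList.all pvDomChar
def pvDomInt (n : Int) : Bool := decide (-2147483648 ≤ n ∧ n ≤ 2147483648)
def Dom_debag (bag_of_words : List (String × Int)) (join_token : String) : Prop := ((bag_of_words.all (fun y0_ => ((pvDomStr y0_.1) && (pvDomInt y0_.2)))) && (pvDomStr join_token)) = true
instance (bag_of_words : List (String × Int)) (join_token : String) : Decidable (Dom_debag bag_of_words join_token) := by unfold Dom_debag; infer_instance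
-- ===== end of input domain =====

-- B sorts only the distinct keys and pre-joins one group string per key, instead of sorting the flat repeated-word list.

-- ===== PORT A =====
def debag (bag_of_words : List (String × Int)) (join_token : String) : String :=
  -- words = []; for key, val in bag_of_words.items(): for i in range(val): words.append(key)
  let words : List String := bag_of_words.foldl
    (fun words p => (PySem.List.pyRange 0 p.2 1).foldl (fun ws _ => ws ++ [p.1]) words) []
  -- words.sort()
  let words := PySem.List.sorted words (fun x => x) false
  -- join_token.join(words)
  PySem.Str.join join_token words

-- ===== PORT B =====
def debag_alt (bag_of_words : List (String × Int)) (join_token : String) : String :=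
  -- groups = [join_token.join([word] * count) for word, count in sorted(..., key=kv[0]) if count > 0]
  let groups : List String :=
    ((PySem.List.sorted bag_of_words (fun kv => kv.1) false).filter
        (fun p => decide (0 < p.2))).map
      (fun p => PySem.Str.join join_token (PySem.List.pyRepeat [p.1] p.2))
  -- join_token.join(groups)
  PySem.Str.join join_token groups

-- ===== PRECONDITION & SPEC =====
def Spec_debag (bag_of_words : List (String × Int)) (join_token : String) (out : String) : Prop := out = debag_alt bag_of_words join_token
instance (bag_of_words : List (String × Int)) (join_token : String) (out : String) : Decidable (Spec_debag bag_of_words join_token out) := by unfold Spec_debag; infer_instance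

-- ===== CLAIM (what is proved, stated in full; the proofs are below) =====
def Claim_equal_debag : Prop := ∀ (bag_of_words : List (String × Int)) (join_token : String), Dom_debag bag_of_words join_token → Spec_debag bag_of_words join_token (debag bag_of_words join_token)

-- ===== LEMMAS AND PROOFS =====

-- the multiset of words both programs expand a bag entry into
def pvExpand (p : String × Int) : List String := List.replicate p.2.toNat p.1

lemma pvExpand_mem {s : String} {p : String × Int} (h : s ∈ pvExpand p) : s = p.1 := by
  simpa [pvExpand] using (List.eq_of_mem_replicate h)

-- flattening key-sorted groups of equal words is a ≤-sorted list
lemma pvFlat_pairwise (L : List (String × Int))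
    (hL : L.Pairwise (fun p q => p.1 ≤ q.1)) :
    (L.flatMap pvExpand).Pairwise (· ≤ ·) := by
  induction L with
  | nil => simp
  | cons p t ih =>
    rcases List.pairwise_cons.mp hL with ⟨hp, ht⟩
    rw [List.flatMap_cons, List.pairwise_append]
    refine ⟨List.pairwise_replicate_of_refl, ih ht, ?_⟩
    intro a ha b hb
    rcases List.mem_flatMap.mp hb with ⟨q, hq, hbq⟩
    rw [pvExpand_mem ha, pvExpand_mem hbq]
    exact hp q hq

-- A's sorted word list is the flattening of the key-sorted bag
lemma pvWords_eq (bag : List (String × Int)) :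
    PySem.List.sorted (bag.flatMap pvExpand) (fun x => x) false
      = (PySem.List.sorted bag (fun kv => kv.1) false).flatMap pvExpand := by
  apply PySem.List.sorted_id_eq_of_perm_of_pairwise
  · exact List.Perm.flatMap_right pvExpand (PySem.List.sorted_perm bag (fun kv => kv.1) false)
  · exact pvFlat_pairwise _ (PySem.List.sorted_pairwise bag (fun kv => kv.1))

-- A's nested append loop builds the flatMap of pvExpand
lemma pvA_words (bag : List (String × Int)) :
    bag.foldl (fun words p => (PySem.List.pyRange 0 p.2 1).foldl (fun ws _ => ws ++ [p.1]) words) []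
      = bag.flatMap pvExpand := by
  have h : ∀ (acc : List String) (p : String × Int),
      (PySem.List.pyRange 0 p.2 1).foldl (fun ws _ => ws ++ [p.1]) acc = acc ++ pvExpand p := by
    intro acc p
    rw [PySem.List.foldl_append_singleton_eq_map]
    simp [pvExpand, PySem.List.length_pyRange_one]
  calc bag.foldl (fun words p => (PySem.List.pyRange 0 p.2 1).foldl (fun ws _ => ws ++ [p.1]) words) []
      = bag.foldl (fun words p => words ++ pvExpand p) [] :=
        PySem.List.foldl_congr_mem bag _ _ [] (fun acc x _ => h acc x)
    _ = bag.flatMap pvExpand := by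
        rw [PySem.List.foldl_append_eq_flatMap]; simp

-- joining a nonempty group in front of the rest splits off the group's join
lemma pvJoin_append (sep : List Char) (g ws : List (List Char)) (hg : g ≠ []) :
    PySem.Chars.join sep (g ++ ws)
      = PySem.Chars.join sep g ++ (if ws = [] then [] else sep ++ PySem.Chars.join sep ws) := by
  induction g with
  | nil => exact absurd rfl hg
  | cons x g ih =>
    cases g with
    | nil =>
      cases ws with
      | nil => simp [PySem.Chars.join_singleton]
      | cons b t => simp [PySem.Chars.join_singleton, PySem.Chars.join_cons_cons]
    | cons y g' =>
      have : (y :: g') ++ ws = y :: (g' ++ ws) := rfl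
      rw [List.cons_append, this, PySem.Chars.join_cons_cons,
          PySem.Chars.join_cons_cons, ← this, ih (by simp)]
      simp [List.append_assoc]

-- pvExpand is empty exactly when the count filter drops the entry
lemma pvFlat_nil_iff (t : List (String × Int)) :
    t.flatMap pvExpand = [] ↔ t.filter (fun p => decide (0 < p.2)) = [] := by
  simp only [List.flatMap_eq_nil_iff, List.filter_eq_nil_iff, pvExpand,
    List.replicate_eq_nil_iff, Int.toNat_eq_zero, decide_eq_true_eq]
  constructor <;> intro h p hp <;> [exact not_lt.mpr (h p hp); exact not_lt.mp (h p hp)]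

-- joining the flat word list equals joining the per-key group joins
lemma pvJoin_groups (sep : List Char) (L : List (String × Int)) :
    PySem.Chars.join sep ((L.flatMap pvExpand).map String.toList)
      = PySem.Chars.join sep ((L.filter (fun p => decide (0 < p.2))).map
          (fun p => PySem.Chars.join sep ((pvExpand p).map String.toList))) := by
  induction L with
  | nil => simp
  | cons p t ih =>
    by_cases hp : 0 < p.2
    · have hg : (pvExpand p).map String.toList ≠ [] := by
        simp [pvExpand, List.replicate_eq_nil_iff]; omega
      rw [List.flatMap_cons, List.map_append, pvJoin_append _ _ _ hg,
          List.filter_cons_of_pos (by simpa using hp), List.map_cons]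
      by_cases hf : t.flatMap pvExpand = []
      · have hfi : t.filter (fun p => decide (0 < p.2)) = [] := (pvFlat_nil_iff t).mp hf
        simp [hf, hfi, PySem.Chars.join_singleton]
      · have hfi : t.filter (fun p => decide (0 < p.2)) ≠ [] := fun h =>
          hf ((pvFlat_nil_iff t).mpr h)
        have h2 : (t.filter (fun p => decide (0 < p.2))).map
            (fun p => PySem.Chars.join sep ((pvExpand p).map String.toList)) ≠ [] := by
          simpa using hfi
        rcases List.exists_cons_of_ne_nil h2 with ⟨y, ys, hy⟩
        rw [hy, PySem.Chars.join_cons_cons, ← hy, ← ih]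
        simp [hf, List.append_assoc]
    · have : pvExpand p = [] := by
        simp [pvExpand, Int.toNat_eq_zero]; omega
      rw [List.flatMap_cons, this, List.nil_append,
          List.filter_cons_of_neg (by simpa using hp)]
      exact ih

-- ===== VERDICT (by name: the statement is the Claim_ definition above) =====
theorem debag_spec : Claim_equal_debag := by
  intro bag tok _
  show _ = _
  simp only [debag, debag_alt, pvA_words, pvWords_eq]
  apply String.toList_injective
  simp only [PySem.Str.toList_join, List.map_map, Function.comp_def,
    PySem.List.pyRepeat_singleton]
  exact pvJoin_groups tok.toList (PySem.List.sorted bag (fun kv => kv.1) false)
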